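-- pv_equiv track=rewrite | github.com/Pjmcnally/algo | utopia_tree.py | linear_while
-- ===== SOURCE A (Python) =====
-- def linear_while(n):
--     height = 1
--     for x in range(1, n+1):
--         if x % 2 == 0:
--             height += 1
--         else:
--             height *= 2
--     return height
-- ===== SOURCE B (Python) =====
-- def linear_while(n):
--     # Closed form: each (double, +1) pair maps h -> 2*h + 1, so after k pairs
--     # starting from 1 the height is 2**(k+1) - 1; an odd trailing step doubles it.
--     if n <= 0:
--         return 1
--     k = n // 2
--     h = 2 ** (k + 1) - 1
--     return h * 2 if n % 2 else h
-- ===== Notes on version B (the rewrite author's own statement) =====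
-- stated objective: faster
-- what changed: Replaces the n-step loop alternating doubling and incrementing by a closed form via one big-int power, derived from the fact that each (double, increment) pair maps h to 2h+1; intended as faster, measured 510x at n=65536 (at the largest size the huge result could not be decoded for either program).
import Mathlib
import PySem

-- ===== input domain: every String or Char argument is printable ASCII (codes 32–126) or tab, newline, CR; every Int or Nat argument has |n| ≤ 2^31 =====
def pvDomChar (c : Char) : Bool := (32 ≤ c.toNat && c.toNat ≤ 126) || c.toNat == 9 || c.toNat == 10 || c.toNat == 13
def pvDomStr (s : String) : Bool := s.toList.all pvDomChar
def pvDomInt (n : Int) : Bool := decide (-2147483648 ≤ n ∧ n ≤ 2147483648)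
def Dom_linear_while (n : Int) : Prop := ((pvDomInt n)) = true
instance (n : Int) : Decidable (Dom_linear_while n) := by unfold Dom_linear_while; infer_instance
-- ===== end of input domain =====

-- B replaces the n-step loop by the closed form 2^(n//2+1)-1 (doubled once more if n is odd): faster.

-- ===== PORT A =====
def linear_while (n : Int) : Int :=
  (PySem.List.pyRange 1 (n + 1) 1).foldl
    (fun height x => if PySem.Int.mod x 2 == 0 then height + 1 else height * 2) 1

-- ===== PORT B =====
def linear_while_alt (n : Int) : Int :=
  if n ≤ 0 then 1
  else
    let k := PySem.Int.floordiv n 2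
    let h := (2 : Int) ^ (k + 1).toNat - 1
    if PySem.Int.mod n 2 ≠ 0 then h * 2 else h

-- ===== PRECONDITION & SPEC =====
def Spec_linear_while (n : Int) (out : Int) : Prop := out = linear_while_alt n
instance (n : Int) (out : Int) : Decidable (Spec_linear_while n out) := by unfold Spec_linear_while; infer_instance

-- ===== CLAIM (what is proved, stated in full; the proofs are below) =====
def Claim_equal_linear_while : Prop := ∀ (n : Int), Dom_linear_while n → Spec_linear_while n (linear_while n)

-- ===== LEMMAS AND PROOFS =====

-- one more loop iteration appends one range element
lemma linear_while_succ (n : Int) (h : 0 ≤ n) :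
    linear_while (n + 1) =
      (if PySem.Int.mod (n + 1) 2 == 0 then linear_while n + 1 else linear_while n * 2) := by
  unfold linear_while
  rw [PySem.List.pyRange_one_succ_right (by omega : (1 : Int) ≤ n + 1)]
  simp [List.foldl_append]

lemma mod_two_eval (a : Int) : PySem.Int.mod a 2 = a % 2 :=
  PySem.Int.mod_eq_emod_of_pos (by omega)

-- loop characterisation, two steps at a time: a (double, +1) pair maps h to 2h+1
lemma linear_while_pair (m : Nat) :
    linear_while (2 * (m : Int)) = 2 ^ (m + 1) - 1 ∧
    linear_while (2 * (m : Int) + 1) = 2 ^ (m + 2) - 2 := by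
  induction m with
  | zero => constructor <;> decide
  | succ m ih =>
    obtain ⟨h0, h1⟩ := ih
    have hA : linear_while (2 * (m : Int) + 2) = 2 ^ (m + 2) - 1 := by
      rw [show (2 * (m : Int) + 2) = (2 * (m : Int) + 1) + 1 by ring,
        linear_while_succ _ (by omega)]
      have hm0 : PySem.Int.mod (2 * (m : Int) + 1 + 1) 2 = 0 := by rw [mod_two_eval]; omega
      rw [hm0]
      simp only [show ((0 : Int) == 0) = true from rfl, if_true]
      rw [h1]; ring
    have hB : linear_while (2 * (m : Int) + 3) = 2 ^ (m + 3) - 2 := by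
      rw [show (2 * (m : Int) + 3) = (2 * (m : Int) + 2) + 1 by ring,
        linear_while_succ _ (by omega)]
      have hm1 : PySem.Int.mod (2 * (m : Int) + 2 + 1) 2 = 1 := by rw [mod_two_eval]; omega
      rw [hm1]
      simp only [show ((1 : Int) == 0) = false from rfl, Bool.false_eq_true, if_false]
      rw [hA]; ring
    constructor
    · rw [show (2 * ((m + 1 : Nat) : Int)) = 2 * (m : Int) + 2 by push_cast; ring, hA,
        show m + 1 + 1 = m + 2 from by omega]
    · rw [show (2 * ((m + 1 : Nat) : Int) + 1) = 2 * (m : Int) + 3 by push_cast; ring, hB,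
        show m + 1 + 2 = m + 3 from by omega]

-- ===== VERDICT (by name: the statement is the Claim_ definition above) =====
theorem linear_while_spec : Claim_equal_linear_while := by
  intro n _
  unfold Spec_linear_while linear_while_alt
  by_cases hn : n ≤ 0
  · simp only [hn, if_true]
    unfold linear_while
    rw [PySem.List.pyRange_one_eq_nil (by omega)]
    rfl
  · simp only [hn, if_false]
    have hpos : 0 < n := by omega
    set m : Nat := n.toNat with hm
    have hn' : n = (m : Int) := by omega
    have hk : PySem.Int.floordiv n 2 = ((m / 2 : Nat) : Int) := by
      rw [PySem.Int.floordiv_eq_ediv_of_pos (by omega), hn']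
      omega
    have hmod : PySem.Int.mod n 2 = ((m % 2 : Nat) : Int) := by
      rw [mod_two_eval, hn']; omega
    rw [hk, hmod]
    have htn : ((m / 2 : Nat) : Int) + 1 = ((m / 2 + 1 : Nat) : Int) := by push_cast; ring
    rw [htn, Int.toNat_natCast]
    rcases Nat.even_or_odd m with he | ho
    · obtain ⟨j, hj⟩ := he
      have : ((m % 2 : Nat) : Int) = 0 := by omega
      simp only [this, ne_eq, not_true_eq_false, if_false]
      have hmj : m = 2 * j := by omega
      have := (linear_while_pair j).1
      rw [hn', hmj]
      push_cast
      rw [this]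
      congr 2
      omega
    · obtain ⟨j, hj⟩ := ho
      have : ¬ ((m % 2 : Nat) : Int) = 0 := by omega
      simp only [ne_eq, this, not_false_eq_true, if_true]
      have := (linear_while_pair j).2
      rw [hn']
      rw [show ((m : Int)) = 2 * (j : Int) + 1 by omega]
      rw [this]
      have : m / 2 + 1 = j + 1 := by omega
      rw [this]
      ring
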